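-- pv_equiv track=rewrite | github.com/jcmullwh/usertest | tools/triage_atoms_audit.py | _extract_first_heading
-- ===== SOURCE A (Python) =====
-- def _extract_first_heading(text: str) -> str:
--     for line in text.splitlines():
--         if line.startswith("# "):
--             return line[2:].strip()
--     for line in text.splitlines():
--         if line.startswith("#"):
--             return line.lstrip("#").strip()
--     return ""
-- ===== SOURCE B (Python) =====
-- def _extract_first_heading(text: str) -> str:
--     fallback = None
--     for line in text.splitlines():
--         if line.startswith("# "):
--             return line[2:].strip()
--         if fallback is None and line.startswith("#"):
--             fallback = line.lstrip("#").strip()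
--     return fallback if fallback is not None else ""
-- ===== Notes on version B (the rewrite author's own statement) =====
-- stated objective: alternative
-- what changed: Single traversal of the lines that returns on a hash-space heading and keeps a fallback candidate for the first bare-hash line, instead of A's two full passes over text.splitlines().
import Mathlib
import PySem

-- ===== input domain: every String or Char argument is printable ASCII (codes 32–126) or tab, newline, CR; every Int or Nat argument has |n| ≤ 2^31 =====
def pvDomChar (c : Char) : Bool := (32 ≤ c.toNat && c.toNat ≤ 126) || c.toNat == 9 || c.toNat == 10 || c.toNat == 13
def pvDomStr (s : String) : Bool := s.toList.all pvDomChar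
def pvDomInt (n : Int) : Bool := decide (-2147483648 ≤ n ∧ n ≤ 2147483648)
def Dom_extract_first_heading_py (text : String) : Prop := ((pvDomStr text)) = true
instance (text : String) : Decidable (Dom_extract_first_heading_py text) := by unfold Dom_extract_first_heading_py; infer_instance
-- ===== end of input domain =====

-- B replaces A's two passes over splitlines() by one traversal holding a fallback candidate (objective: alternative).

-- ===== PORT A =====
-- line.lstrip("#") ported by hand as dropWhile (· == '#'): exact, since the chars argument is the single character '#'.
def pvLstripHash (l : String) : String := String.ofList (l.toList.dropWhile (· == '#'))

-- second 'for' loop of A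
def pvGoA2 (lines : List String) : String :=
  match lines with
  | [] => ""
  | l :: ls => if PySem.Str.startswith l "#" then PySem.Str.strip (pvLstripHash l) else pvGoA2 ls

-- first 'for' loop of A; 'all' is the full splitlines list for the second loop
def pvGoA1 (lines all : List String) : String :=
  match lines with
  | [] => pvGoA2 all
  | l :: ls => if PySem.Str.startswith l "# " then PySem.Str.strip (PySem.Str.slice l (some 2) none) else pvGoA1 ls all

def extract_first_heading_py (text : String) : String :=
  pvGoA1 (PySem.Str.splitlines text) (PySem.Str.splitlines text)

-- ===== PORT B =====
def pvGoB (lines : List String) (fallback : Option String) : String :=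
  match lines with
  | [] => match fallback with | some s => s | none => ""
  | l :: ls =>
    if PySem.Str.startswith l "# " then PySem.Str.strip (PySem.Str.slice l (some 2) none)
    else if fallback.isNone && PySem.Str.startswith l "#" then
      pvGoB ls (some (PySem.Str.strip (pvLstripHash l)))
    else pvGoB ls fallback

def extract_first_heading_py_alt (text : String) : String :=
  pvGoB (PySem.Str.splitlines text) none

-- ===== PRECONDITION & SPEC =====
def Spec_extract_first_heading_py (text : String) (out : String) : Prop := out = extract_first_heading_py_alt text
instance (text : String) (out : String) : Decidable (Spec_extract_first_heading_py text out) := by unfold Spec_extract_first_heading_py; infer_instance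

-- ===== CLAIM (what is proved, stated in full; the proofs are below) =====
def Claim_equal_extract_first_heading_py : Prop := ∀ (text : String), Dom_extract_first_heading_py text → Spec_extract_first_heading_py text (extract_first_heading_py text)

-- ===== LEMMAS AND PROOFS =====

-- closed form of A's second loop
theorem pvGoA2_eq (lines : List String) :
    pvGoA2 lines = match lines.find? (fun l => PySem.Str.startswith l "#") with
      | some l => PySem.Str.strip (pvLstripHash l)
      | none => "" := by
  induction lines with
  | nil => simp [pvGoA2]
  | cons l ls ih =>
    by_cases h : PySem.Chars.startswith l.toList ['#'] = true <;>
      simp [pvGoA2, List.find?, h, ih]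

-- closed form of A's first loop
theorem pvGoA1_eq (lines all : List String) :
    pvGoA1 lines all = match lines.find? (fun l => PySem.Str.startswith l "# ") with
      | some l => PySem.Str.strip (PySem.Str.slice l (some 2) none)
      | none => pvGoA2 all := by
  induction lines with
  | nil => simp [pvGoA1]
  | cons l ls ih =>
    by_cases h : PySem.Chars.startswith l.toList ['#', ' '] = true <;>
      simp [pvGoA1, List.find?, h, ih]

-- closed form of B's single loop, with the fallback invariant
theorem pvGoB_eq (lines : List String) (fb : Option String) :
    pvGoB lines fb = match lines.find? (fun l => PySem.Str.startswith l "# ") with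
      | some l => PySem.Str.strip (PySem.Str.slice l (some 2) none)
      | none => match fb with
        | some s => s
        | none => match lines.find? (fun l => PySem.Str.startswith l "#") with
          | some l => PySem.Str.strip (pvLstripHash l)
          | none => "" := by
  induction lines generalizing fb with
  | nil => simp [pvGoB]
  | cons l ls ih =>
    by_cases h2 : PySem.Chars.startswith l.toList ['#', ' '] = true
    · simp [pvGoB, List.find?, h2]
    · by_cases h1 : PySem.Chars.startswith l.toList ['#'] = true
      · cases fb with
        | none => simp [pvGoB, List.find?, h1, h2, ih]
        | some s => simp [pvGoB, List.find?, h1, h2, ih]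
      · cases fb with
        | none => simp [pvGoB, List.find?, h1, h2, ih]
        | some s => simp [pvGoB, List.find?, h1, h2, ih]

-- ===== VERDICT (by name: the statement is the Claim_ definition above) =====
theorem extract_first_heading_py_spec : Claim_equal_extract_first_heading_py := by
  intro text _
  unfold Spec_extract_first_heading_py extract_first_heading_py extract_first_heading_py_alt
  rw [pvGoA1_eq, pvGoB_eq, pvGoA2_eq]
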